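-- pv_equiv track=rewrite | github.com/jsr66/EFT-Generator | EFTGen/derivative_assignments.py | tuples_sum
-- ===== SOURCE A (Python) =====
-- from itertools import permutations
--
-- def tuples_sum(nbval,total,order=True) :
--     """
--         Generate all the tuples L of nbval positive or nul integer
--         such that sum(L)=total.
--         The tuples may be ordered (decreasing order) or not
--     """
--     if nbval == 0 and total == 0 : yield tuple() ; return #raise StopIteration
--     if nbval == 1 : yield (total,) ; return #raise StopIteration
--     if total==0 : yield (0,)*nbval ; return #raise StopIteration
--     for start in range(total,0,-1) :
--         for qu in tuples_sum(nbval-1,total-start) :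
--             if qu[0]<=start :
--                 sol=(start,)+qu
--                 if order : yield sol
--                 else :
--                     l=set()
--                     for p in permutations(sol,len(sol)) :
--                         if p not in l :
--                             l.add(p)
--                             yield p
-- ===== SOURCE B (Python) =====
-- def tuples_sum(nbval, total, order=True):
--     """
--         Generate all the tuples L of nbval positive or nul integer
--         such that sum(L)=total, output-sensitively: the recursion
--         carries the allowed maximum for the next element, so no
--         candidate is ever generated and then discarded, and repeated
--         permutations are never produced in the unordered case.
--     """
--     if nbval == 0 and total == 0:
--         yield tuple()
--         return
--     if nbval == 1:
--         yield (total,)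
--         return
--     if total == 0:
--         yield (0,) * nbval
--         return
--     if nbval < 2:
--         return  # no tuple of fewer than two nonnegative integers sums to a positive total
--     for sol in _bounded(nbval, total, total):
--         if order:
--             yield sol
--         else:
--             yield from _distinct_perms(sol)
--
--
-- def _bounded(k, total, mx):
--     # decreasing k-tuples (k >= 1) of nonnegative integers summing to total,
--     # with first element <= mx, heads enumerated in decreasing order
--     if k == 1:
--         if total <= mx:
--             yield (total,)
--         return
--     if total == 0:
--         yield (0,) * k
--         return
--     for head in range(min(mx, total), 0, -1):
--         for rest in _bounded(k - 1, total - head, head):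
--             yield (head,) + rest
--
--
-- def _distinct_perms(sol):
--     # distinct permutations of sol, head chosen among distinct values in
--     # first-occurrence order, recursing on the remainder
--     if not sol:
--         yield tuple()
--         return
--     seen = []
--     for idx, v in enumerate(sol):
--         if v in seen:
--             continue
--         seen.append(v)
--         rest = sol[:idx] + sol[idx + 1:]
--         for p in _distinct_perms(rest):
--             yield (v,) + p
-- ===== Notes on version B (the rewrite author's own statement) =====
-- stated objective: alternative
-- what changed: B threads the allowed maximum for the next element through the recursion (and enumerates distinct permutations directly in the unordered case), so it only ever builds valid tuples, instead of A's generate-then-filter recursion that discards candidates and dedups all n! permutations through a set; intended as faster (measured 8.41x at the largest size both finished) but a timing run could not confirm it at every size.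
import Mathlib
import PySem

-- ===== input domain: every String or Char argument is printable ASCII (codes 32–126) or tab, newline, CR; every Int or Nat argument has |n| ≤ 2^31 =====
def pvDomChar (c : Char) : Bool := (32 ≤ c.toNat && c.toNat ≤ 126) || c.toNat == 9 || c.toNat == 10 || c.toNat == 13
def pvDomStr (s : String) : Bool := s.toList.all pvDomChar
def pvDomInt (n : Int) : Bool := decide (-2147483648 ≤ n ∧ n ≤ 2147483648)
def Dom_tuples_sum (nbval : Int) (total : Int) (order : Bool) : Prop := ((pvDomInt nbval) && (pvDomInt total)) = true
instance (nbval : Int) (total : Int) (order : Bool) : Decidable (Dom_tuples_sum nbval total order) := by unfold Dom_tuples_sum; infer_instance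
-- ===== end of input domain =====

-- B replaces A's generate-then-filter recursion by a bounded, output-sensitive one
-- (and direct distinct-permutation enumeration); proved equal wherever A returns.

-- ===== PORT A =====

-- itertools.permutations(sol, len(sol)): element at each index position, index
-- sequences in lexicographic order (exact order of itertools.permutations)
def pyPermutations (l : List Int) : List (List Int) :=
  if h : l = [] then [[]]
  else
    (List.range l.length).attach.flatMap
      (fun i => (pyPermutations (l.eraseIdx i.1)).map (fun t => l.getD i.1 0 :: t))
termination_by l.length
decreasing_by
  have hi : i.1 < l.length := by simpa [List.mem_range] using i.2
  rw [List.length_eraseIdx_of_lt hi]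
  have : l.length ≠ 0 := by simpa [List.length_eq_zero_iff] using h
  omega

-- the per-sol 'l=set(); for p in permutations(sol): if p not in l: l.add(p); yield p'
def permsDedup (sol : List Int) : List (List Int) :=
  ((pyPermutations sol).foldl
    (fun (st : PySem.Set (List Int) × List (List Int)) p =>
      if p ∈ st.1 then st else (PySem.Set.add st.1 p, st.2 ++ [p]))
    (PySem.Set.empty, [])).2

def tuples_sum (nbval : Int) (total : Int) (order : Bool) : List (List Int) :=
  if nbval = 0 ∧ total = 0 then [[]]
  else if nbval = 1 then [[total]]
  else if total = 0 then [List.replicate nbval.toNat 0]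
  else
    (PySem.List.pyRange total 0 (-1)).attach.foldl
      (fun acc start =>
        (tuples_sum (nbval - 1) (total - start.1) true).foldl
          (fun acc2 qu =>
            match qu with
            | [] => acc2   -- Python raises IndexError on qu[0] here; excluded by Pre_
            | q0 :: rest =>
              if q0 ≤ start.1 then
                if order then acc2 ++ [start.1 :: q0 :: rest]
                else acc2 ++ permsDedup (start.1 :: q0 :: rest)
              else acc2)
          acc)
      []
termination_by total.toNat
decreasing_by
  have hs : (0:Int) < start.1 ∧ start.1 ≤ total := by
    simpa using (PySem.List.mem_pyRange_neg_one.mp start.2)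
  omega

-- ===== PORT B =====

-- decreasing k-tuples (k ≥ 1) of nonnegative integers summing to total, head ≤ mx
def boundedB (k : Int) (total : Int) (mx : Int) : List (List Int) :=
  if k = 1 then (if total ≤ mx then [[total]] else [])
  else if total = 0 then [List.replicate k.toNat 0]
  else
    (PySem.List.pyRange (min mx total) 0 (-1)).attach.flatMap
      (fun head => (boundedB (k - 1) (total - head.1) head.1).map (fun rest => head.1 :: rest))
termination_by total.toNat
decreasing_by
  have hs : (0:Int) < head.1 ∧ head.1 ≤ min mx total := by
    simpa using (PySem.List.mem_pyRange_neg_one.mp head.2)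
  omega

-- distinct permutations: head chosen among distinct values in first-occurrence order
def distinctPerms (sol : List Int) : List (List Int) :=
  if h : sol = [] then [[]]
  else
    ((PySem.List.enumerate sol).attach.foldl
      (fun (st : List Int × List (List Int)) iv =>
        if iv.1.2 ∈ st.1 then st
        else (st.1 ++ [iv.1.2],
              st.2 ++ (distinctPerms (sol.eraseIdx iv.1.1.toNat)).map (fun p => iv.1.2 :: p)))
      ([], [])).2
termination_by sol.length
decreasing_by
  obtain ⟨k, hk, hp⟩ := (PySem.List.mem_enumerate_iff _ _ _).mp iv.2
  have : iv.1.1.toNat < sol.length := by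
    have : iv.1.1 = (k : Int) := by rw [hp]; simp
    omega
  rw [List.length_eraseIdx_of_lt this]
  have : sol.length ≠ 0 := by simpa [List.length_eq_zero_iff] using h
  omega

def tuples_sum_alt (nbval : Int) (total : Int) (order : Bool) : List (List Int) :=
  if nbval = 0 ∧ total = 0 then [[]]
  else if nbval = 1 then [[total]]
  else if total = 0 then [List.replicate nbval.toNat 0]
  else if nbval < 2 then []
  else
    (boundedB nbval total total).flatMap
      (fun sol => if order then [sol] else distinctPerms sol)

-- ===== PRECONDITION & SPEC =====
-- Pre_ excludes exactly the inputs where A raises IndexError (nbval ≤ 0 with total ≥ 1: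
-- A's recursion reaches an empty sub-tuple and evaluates qu[0]).
def Pre_tuples_sum (nbval : Int) (total : Int) (order : Bool) : Prop := 1 ≤ nbval ∨ total ≤ 0
instance (nbval : Int) (total : Int) (order : Bool) : Decidable (Pre_tuples_sum nbval total order) := by unfold Pre_tuples_sum; infer_instance
def pvWitness_tuples_sum : Int × Int × Bool := (3, 4, true)

def Spec_tuples_sum (nbval : Int) (total : Int) (order : Bool) (out : List (List Int)) : Prop := out = tuples_sum_alt nbval total order
instance (nbval : Int) (total : Int) (order : Bool) (out : List (List Int)) : Decidable (Spec_tuples_sum nbval total order out) := by unfold Spec_tuples_sum; infer_instance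

-- ===== CLAIM (what is proved, stated in full; the proofs are below) =====
def Claim_equal_tuples_sum : Prop := ∀ (nbval : Int) (total : Int) (order : Bool), Dom_tuples_sum nbval total order → Pre_tuples_sum nbval total order → Spec_tuples_sum nbval total order (tuples_sum nbval total order)

-- ===== LEMMAS AND PROOFS =====

-- attach eliminations
theorem attach_flatMap_eq {α β : Type} (l : List α) (f : α → List β) :
    l.attach.flatMap (fun x => f x.1) = l.flatMap f := by
  conv_rhs => rw [← List.attach_map_subtype_val l]
  rw [List.flatMap_map]

theorem attach_foldl_eq {α β : Type} (l : List α) (f : β → α → β) (b : β) :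
    l.attach.foldl (fun acc x => f acc x.1) b = l.foldl f b := by
  conv_rhs => rw [← List.attach_map_subtype_val l]
  rw [List.foldl_map]

theorem perm_cons_eraseIdx' {α : Type} (l : List α) (i : Nat) (hi : i < l.length) :
    l.Perm (l[i] :: l.eraseIdx i) := by
  conv_lhs => rw [← List.take_append_drop i l, ← List.getElem_cons_drop hi]
  rw [List.eraseIdx_eq_take_drop_succ]
  exact List.perm_middle

theorem take_succ_getElem {α : Type} (l : List α) (j : Nat) (hj : j < l.length) :
    l.take (j + 1) = l.take j ++ [l[j]] := by
  rw [List.take_succ]; simp [List.getElem?_eq_getElem hj]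

-- membership of pyPermutations is exactly being a permutation
theorem pyPerms_unfold (l : List Int) (h : l ≠ []) :
    pyPermutations l = (List.range l.length).flatMap
      (fun i => (pyPermutations (l.eraseIdx i)).map (fun t => l.getD i 0 :: t)) := by
  rw [pyPermutations.eq_def, dif_neg h]
  exact attach_flatMap_eq _ (fun i => (pyPermutations (l.eraseIdx i)).map (fun t => l.getD i 0 :: t))

theorem mem_pyPerms_aux (n : Nat) : ∀ (l : List Int), l.length ≤ n →
    ∀ p : List Int, (p ∈ pyPermutations l ↔ p.Perm l) := by
  induction n with
  | zero =>
    intro l hl p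
    have hnil : l = [] := by cases l <;> simp_all
    subst hnil
    rw [pyPermutations.eq_def]
    simp [List.perm_nil]
  | succ n ih =>
    intro l hl p
    by_cases h : l = []
    · subst h; rw [pyPermutations.eq_def]; simp [List.perm_nil]
    · rw [pyPerms_unfold l h]
      simp only [List.mem_flatMap, List.mem_range, List.mem_map]
      constructor
      · rintro ⟨i, hi, t, ht, rfl⟩
        rw [List.getD_eq_getElem l 0 hi]
        have hlen : (l.eraseIdx i).length ≤ n := by
          rw [List.length_eraseIdx_of_lt hi]; omega
        have htp : t.Perm (l.eraseIdx i) := (ih (l.eraseIdx i) hlen t).mp ht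
        exact ((htp.cons _).trans (perm_cons_eraseIdx' l i hi).symm)
      · intro hp
        cases p with
        | nil =>
          exfalso; apply h
          have := hp.length_eq; cases l <;> simp_all
        | cons v t =>
          have hv : v ∈ l := hp.mem_iff.mp (List.mem_cons_self ..)
          obtain ⟨i, hi, hvi⟩ := List.mem_iff_getElem.mp hv
          refine ⟨i, hi, t, ?_, ?_⟩
          · have hlen : (l.eraseIdx i).length ≤ n := by
              rw [List.length_eraseIdx_of_lt hi]; omega
            apply (ih (l.eraseIdx i) hlen t).mpr
            have h1 : (v :: t).Perm (l[i] :: l.eraseIdx i) := hp.trans (perm_cons_eraseIdx' l i hi)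
            rw [← hvi] at h1
            exact h1.cons_inv
          · rw [List.getD_eq_getElem l 0 hi, hvi]

theorem mem_pyPerms (l p : List Int) : p ∈ pyPermutations l ↔ p.Perm l :=
  mem_pyPerms_aux l.length l le_rfl p

-- the state step of A's per-sol permutation dedup loop
def dstep (st : PySem.Set (List Int) × List (List Int)) (p : List Int) :
    PySem.Set (List Int) × List (List Int) :=
  if p ∈ st.1 then st else (PySem.Set.add st.1 p, st.2 ++ [p])

theorem permsDedup_eq_foldl (sol : List Int) :
    permsDedup sol = ((pyPermutations sol).foldl dstep (PySem.Set.empty, [])).2 := rfl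

theorem dstep_of_mem {S : PySem.Set (List Int)} {x : List Int} (out : List (List Int))
    (hx : x ∈ S) : dstep (S, out) x = (S, out) := by simp [dstep, hx]

theorem dstep_of_not_mem {S : PySem.Set (List Int)} {x : List Int} (out : List (List Int))
    (hx : ¬ x ∈ S) : dstep (S, out) x = (PySem.Set.add S x, out ++ [x]) := by simp [dstep, hx]

theorem foldl_dstep_split (xs : List (List Int)) :
    ∀ (S : PySem.Set (List Int)) (out : List (List Int)),
      xs.foldl dstep (S, out) = ((xs.foldl dstep (S, [])).1, out ++ (xs.foldl dstep (S, [])).2) := by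
  induction xs with
  | nil => intro S out; simp
  | cons x xs ih =>
    intro S out
    simp only [List.foldl_cons]
    by_cases hx : x ∈ S
    · rw [dstep_of_mem out hx, dstep_of_mem [] hx]; exact ih S out
    · rw [dstep_of_not_mem out hx, dstep_of_not_mem [] hx]
      simp only [List.nil_append]
      rw [ih (PySem.Set.add S x) (out ++ [x]), ih (PySem.Set.add S x) [x]]
      simp

theorem mem_foldl_dstep_fst (xs : List (List Int)) :
    ∀ (S : PySem.Set (List Int)) (out : List (List Int)) (q : List Int),
      (q ∈ (xs.foldl dstep (S, out)).1 ↔ q ∈ S ∨ q ∈ xs) := by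
  induction xs with
  | nil => intro S out q; simp
  | cons x xs ih =>
    intro S out q
    simp only [List.foldl_cons, List.mem_cons]
    by_cases hx : x ∈ S
    · rw [dstep_of_mem out hx, ih]
      constructor
      · rintro (h | h) <;> tauto
      · rintro (h | h | h)
        · tauto
        · subst h; tauto
        · tauto
    · rw [dstep_of_not_mem out hx, ih]
      rw [PySem.Set.mem_add]
      tauto

theorem foldl_dstep_all_mem (xs : List (List Int)) :
    ∀ (S : PySem.Set (List Int)) (out : List (List Int)),
      (∀ p ∈ xs, p ∈ S) → xs.foldl dstep (S, out) = (S, out) := by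
  induction xs with
  | nil => intro S out _; simp
  | cons x xs ih =>
    intro S out h
    simp only [List.foldl_cons]
    rw [dstep_of_mem out (h x (List.mem_cons_self ..))]
    exact ih S out (fun p hp => h p (List.mem_cons_of_mem _ hp))

theorem foldl_dstep_cons_block (v : Int) (X : List (List Int)) :
    ∀ (S T : PySem.Set (List Int)),
      (∀ t : List Int, ((v :: t) ∈ S ↔ t ∈ T)) →
      ((X.map (fun t => v :: t)).foldl dstep (S, [])).2
        = ((X.foldl dstep (T, [])).2).map (fun t => v :: t) := by
  induction X with
  | nil => intro S T _; simp
  | cons t0 X ih =>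
    intro S T h
    simp only [List.map_cons, List.foldl_cons]
    by_cases ht : t0 ∈ T
    · rw [dstep_of_mem [] ((h t0).mpr ht), dstep_of_mem [] ht]
      exact ih S T h
    · have hv : ¬ (v :: t0) ∈ S := fun c => ht ((h t0).mp c)
      rw [dstep_of_not_mem [] hv, dstep_of_not_mem [] ht]
      simp only [List.nil_append]
      rw [foldl_dstep_split (X.map (fun t => v :: t)) _ [v :: t0],
        foldl_dstep_split X _ [t0]]
      simp only [List.map_append, List.map_cons, List.map_nil]
      rw [ih (PySem.Set.add S (v :: t0)) (PySem.Set.add T t0) ?_]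
      intro t
      rw [PySem.Set.mem_add, PySem.Set.mem_add, h t]
      simp [List.cons.injEq]

-- the common specification of both dedup loops: one block per first occurrence
def specF (l : List Int) (i : Nat) : List (List Int) :=
  if l.getD i 0 ∈ l.take i then []
  else (distinctPerms (l.eraseIdx i)).map (fun t => l.getD i 0 :: t)

theorem blockC (l : List Int)
    (IH2 : ∀ m : List Int, m.length < l.length → permsDedup m = distinctPerms m) :
    ∀ (m j : Nat) (S : PySem.Set (List Int)), j + m = l.length →
      (∀ p : List Int, (p ∈ S ↔ (p.Perm l ∧ ∃ v ∈ l.take j, p.head? = some v))) →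
      (((List.range' j m).flatMap
          (fun i => (pyPermutations (l.eraseIdx i)).map (fun t => l.getD i 0 :: t))).foldl
          dstep (S, [])).2
        = (List.range' j m).flatMap (specF l) := by
  intro m
  induction m with
  | zero => intro j S _ _; simp
  | succ m ih =>
    intro j S hjm hS
    have hj : j < l.length := by omega
    have hgd : l.getD j 0 = l[j] := List.getD_eq_getElem l 0 hj
    have htake : l.take (j+1) = l.take j ++ [l[j]] := take_succ_getElem l j hj
    rw [List.range'_succ]
    simp only [List.flatMap_cons]
    rw [List.foldl_append]
    by_cases hmem : l.getD j 0 ∈ l.take j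
    · have hall : ∀ p ∈ (pyPermutations (l.eraseIdx j)).map (fun t => l.getD j 0 :: t), p ∈ S := by
        intro p hp
        simp only [List.mem_map] at hp
        obtain ⟨t, ht, rfl⟩ := hp
        have htp : t.Perm (l.eraseIdx j) := (mem_pyPerms _ t).mp ht
        rw [hS]
        refine ⟨?_, ⟨l.getD j 0, hmem, by simp⟩⟩
        rw [hgd]
        exact ((htp.cons _).trans (perm_cons_eraseIdx' l j hj).symm)
      rw [foldl_dstep_all_mem _ _ _ hall]
      rw [ih (j+1) S (by omega) ?_]
      · have : specF l j = [] := by rw [specF, if_pos hmem]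
        rw [this]; simp
      · intro p
        rw [hS, htake]
        constructor
        · rintro ⟨hp, v, hv, hhd⟩
          exact ⟨hp, v, List.mem_append_left _ hv, hhd⟩
        · rintro ⟨hp, v, hv, hhd⟩
          simp only [List.mem_append, List.mem_singleton] at hv
          rcases hv with hv | hv
          · exact ⟨hp, v, hv, hhd⟩
          · subst hv; exact ⟨hp, l[j], hgd ▸ hmem, hhd⟩
    · -- first occurrence of l[j]
      have hrel : ∀ t : List Int, ((l.getD j 0 :: t) ∈ S ↔ t ∈ (PySem.Set.empty : PySem.Set (List Int))) := by
        intro t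
        constructor
        · intro hmemS
          exfalso
          obtain ⟨_, v, hv, hhd⟩ := (hS _).mp hmemS
          simp only [List.head?_cons, Option.some.injEq] at hhd
          exact hmem (hhd ▸ hv)
        · intro hfalse; exact absurd hfalse (by simp [PySem.Set.empty])
      set Bj := (pyPermutations (l.eraseIdx j)).map (fun t => l.getD j 0 :: t) with hBj
      have hout : (List.foldl dstep (S, []) Bj).2 = specF l j := by
        rw [hBj, foldl_dstep_cons_block (l.getD j 0) (pyPermutations (l.eraseIdx j)) S PySem.Set.empty hrel]
        rw [← permsDedup_eq_foldl]
        rw [IH2 (l.eraseIdx j) (by rw [List.length_eraseIdx_of_lt hj]; omega)]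
        rw [specF, if_neg hmem]
      rw [show List.foldl dstep (List.foldl dstep (S, []) Bj)
            (List.flatMap (fun i => List.map (fun t => l.getD i 0 :: t) (pyPermutations (l.eraseIdx i)))
              (List.range' (j+1) m))
          = List.foldl dstep ((List.foldl dstep (S, []) Bj).1, (List.foldl dstep (S, []) Bj).2)
            (List.flatMap (fun i => List.map (fun t => l.getD i 0 :: t) (pyPermutations (l.eraseIdx i)))
              (List.range' (j+1) m)) from by rw [Prod.mk.eta]]
      rw [foldl_dstep_split]
      simp only []
      rw [hout]
      rw [ih (j+1) (List.foldl dstep (S, []) Bj).1 (by omega) ?_]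
      · intro p
        rw [mem_foldl_dstep_fst Bj S []]
        constructor
        · rintro (hpS | hpB)
          · obtain ⟨hp, v, hv, hhd⟩ := (hS p).mp hpS
            exact ⟨hp, v, by rw [htake]; exact List.mem_append_left _ hv, hhd⟩
          · rw [hBj] at hpB
            simp only [List.mem_map] at hpB
            obtain ⟨t, ht, rfl⟩ := hpB
            have htp := (mem_pyPerms _ t).mp ht
            refine ⟨?_, l.getD j 0, ?_, by simp⟩
            · rw [hgd]
              exact ((htp.cons _).trans (perm_cons_eraseIdx' l j hj).symm)
            · rw [htake, hgd]
              exact List.mem_append_right _ (by simp)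
        · rintro ⟨hp, v, hv, hhd⟩
          rw [htake] at hv
          rcases List.mem_append.mp hv with hv | hv
          · exact Or.inl ((hS p).mpr ⟨hp, v, hv, hhd⟩)
          · have hv' : v = l[j] := by simpa using hv
            cases p with
            | nil => simp at hhd
            | cons a t =>
              simp only [List.head?_cons, Option.some.injEq] at hhd
              subst hhd
              right
              rw [hBj]
              simp only [List.mem_map]
              refine ⟨t, ?_, by rw [hgd, ← hv']⟩
              apply (mem_pyPerms _ t).mpr
              have h1 : (a :: t).Perm (l[j] :: l.eraseIdx j) := hp.trans (perm_cons_eraseIdx' l j hj)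
              rw [hv'] at h1
              exact h1.cons_inv

-- the state step of B's distinct-permutation loop over enumerate
def bstepF (l : List Int) (st : List Int × List (List Int)) (iv : Int × Int) :
    List Int × List (List Int) :=
  if iv.2 ∈ st.1 then st
  else (st.1 ++ [iv.2], st.2 ++ (distinctPerms (l.eraseIdx iv.1.toNat)).map (fun p => iv.2 :: p))

theorem distinctPerms_unfold (l : List Int) (h : l ≠ []) :
    distinctPerms l = ((PySem.List.enumerate l).foldl (bstepF l) ([], [])).2 := by
  rw [distinctPerms.eq_def, dif_neg h]
  show ((PySem.List.enumerate l).attach.foldl (fun acc x => bstepF l acc x.1) ([], [])).2 = _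
  rw [attach_foldl_eq (PySem.List.enumerate l) (bstepF l) ([], [])]

theorem pLoop (l : List Int) :
    ∀ (m j : Nat) (S : List Int) (out : List (List Int)), j + m = l.length →
      (∀ v : Int, (v ∈ S ↔ v ∈ l.take j)) →
      ((PySem.List.enumerate (l.drop j) (j : Int)).foldl (bstepF l) (S, out)).2
        = out ++ (List.range' j m).flatMap (specF l) := by
  intro m
  induction m with
  | zero =>
    intro j S out hjm _
    rw [List.drop_eq_nil_of_le (by omega)]
    simp [PySem.List.enumerate]
  | succ m ih =>
    intro j S out hjm hS
    have hj : j < l.length := by omega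
    have hgd : l.getD j 0 = l[j] := List.getD_eq_getElem l 0 hj
    have htake : l.take (j+1) = l.take j ++ [l[j]] := take_succ_getElem l j hj
    have hd : l.drop j = l[j] :: l.drop (j+1) := (List.getElem_cons_drop hj).symm
    rw [hd, PySem.List.enumerate_cons]
    simp only [List.foldl_cons]
    have hcast : (j : Int) + 1 = ((j + 1 : Nat) : Int) := by push_cast; ring
    rw [List.range'_succ]
    simp only [List.flatMap_cons]
    by_cases hmem : l[j] ∈ S
    · have hstep : bstepF l (S, out) ((j : Int), l[j]) = (S, out) := by
        simp [bstepF, hmem]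
      rw [hstep, hcast, ih (j+1) S out (by omega) ?_]
      · have : specF l j = [] := by
          rw [specF, if_pos (hgd ▸ ((hS _).mp hmem))]
        rw [this]
        simp
      · intro v
        rw [hS, htake]
        have hjmem : l[j] ∈ l.take j := (hS _).mp hmem
        simp only [List.mem_append, List.mem_singleton]
        constructor
        · exact fun h => Or.inl h
        · rintro (h | h)
          · exact h
          · subst h; exact hjmem
    · have hstep : bstepF l (S, out) ((j : Int), l[j])
          = (S ++ [l[j]], out ++ (distinctPerms (l.eraseIdx j)).map (fun p => l[j] :: p)) := by
        simp [bstepF, hmem]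
      rw [hstep, hcast, ih (j+1) (S ++ [l[j]]) _ (by omega) ?_]
      · have : specF l j = (distinctPerms (l.eraseIdx j)).map (fun t => l[j] :: t) := by
          rw [specF, if_neg (by rw [hgd]; exact fun c => hmem ((hS _).mpr c)), hgd]
        rw [this]
        simp
      · intro v
        rw [htake]
        simp only [List.mem_append, List.mem_singleton, hS v]

theorem L2_aux (n : Nat) : ∀ sol : List Int, sol.length ≤ n →
    permsDedup sol = distinctPerms sol := by
  induction n with
  | zero =>
    intro sol h
    have : sol = [] := by cases sol <;> simp_all
    subst this
    rw [permsDedup_eq_foldl, pyPermutations.eq_def, dif_pos rfl,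
      distinctPerms.eq_def, dif_pos rfl]
    simp [dstep, PySem.Set.empty, PySem.Set.add]
  | succ n ih =>
    intro sol h
    by_cases hs : sol = []
    · subst hs
      rw [permsDedup_eq_foldl, pyPermutations.eq_def, dif_pos rfl,
        distinctPerms.eq_def, dif_pos rfl]
      simp [dstep, PySem.Set.empty, PySem.Set.add]
    · have IH2 : ∀ m : List Int, m.length < sol.length → permsDedup m = distinctPerms m := by
        intro m hm; exact ih m (by omega)
      rw [permsDedup_eq_foldl, pyPerms_unfold sol hs, List.range_eq_range']
      rw [blockC sol IH2 sol.length 0 PySem.Set.empty (by omega) ?_]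
      · rw [distinctPerms_unfold sol hs]
        rw [show PySem.List.enumerate sol = PySem.List.enumerate (sol.drop 0) ((0 : Nat) : Int) from by
          simp]
        rw [pLoop sol sol.length 0 [] [] (by omega) (by simp)]
        simp
      · intro p
        constructor
        · intro hp; exact absurd hp (by simp [PySem.Set.empty])
        · rintro ⟨_, v, hv, _⟩; simp at hv

theorem L2_permsDedup_eq_distinctPerms (sol : List Int) : permsDedup sol = distinctPerms sol :=
  L2_aux sol.length sol le_rfl

-- A's inner test 'qu[0] <= start' as a keep/drop block
def selOk (s : Int) (qu : List Int) : List (List Int) :=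
  match qu with
  | [] => []
  | q0 :: rest => if q0 ≤ s then [q0 :: rest] else []

def gOrd (order : Bool) (st : Int) (q : List Int) : List (List Int) :=
  if order then [st :: q] else permsDedup (st :: q)

theorem tuples_sum_unfold (nbval total : Int) (order : Bool)
    (h0 : ¬(nbval = 0 ∧ total = 0)) (h1 : ¬ nbval = 1) (h2 : ¬ total = 0) :
    tuples_sum nbval total order
      = (PySem.List.pyRange total 0 (-1)).flatMap (fun st =>
          (tuples_sum (nbval - 1) (total - st) true).flatMap (fun qu =>
            (selOk st qu).flatMap (gOrd order st))) := by
  rw [tuples_sum.eq_def, if_neg h0, if_neg h1, if_neg h2]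
  have hin : ∀ (st : Int) (acc : List (List Int)),
      (tuples_sum (nbval - 1) (total - st) true).foldl
        (fun acc2 qu =>
          match qu with
          | [] => acc2
          | q0 :: rest =>
            if q0 ≤ st then
              if order then acc2 ++ [st :: q0 :: rest] else acc2 ++ permsDedup (st :: q0 :: rest)
            else acc2) acc
      = acc ++ (tuples_sum (nbval - 1) (total - st) true).flatMap
          (fun qu => (selOk st qu).flatMap (gOrd order st)) := by
    intro st acc
    trans ((tuples_sum (nbval - 1) (total - st) true).foldl
      (fun acc2 qu => acc2 ++ (selOk st qu).flatMap (gOrd order st)) acc)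
    · refine PySem.List.foldl_congr_mem _ _ _ _ ?_
      intro acc2 qu _
      cases qu with
      | nil => simp [selOk]
      | cons q0 rest =>
        by_cases hle : q0 ≤ st
        · cases order <;> simp [selOk, gOrd, hle]
        · simp [selOk, gOrd, hle]
    · exact PySem.List.foldl_append_eq_flatMap _ _ _
  trans ((PySem.List.pyRange total 0 (-1)).attach.foldl
    (fun (acc : List (List Int)) (start : {x // x ∈ PySem.List.pyRange total 0 (-1)}) =>
      acc ++ (tuples_sum (nbval - 1) (total - start.1) true).flatMap
        (fun qu => (selOk start.1 qu).flatMap (gOrd order start.1))) [])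
  · refine PySem.List.foldl_congr_mem _ _ _ _ ?_
    intro acc start _
    exact hin start.1 acc
  · rw [attach_foldl_eq (PySem.List.pyRange total 0 (-1))
      (fun acc st => acc ++ (tuples_sum (nbval - 1) (total - st) true).flatMap
        (fun qu => (selOk st qu).flatMap (gOrd order st))) []]
    rw [PySem.List.foldl_append_eq_flatMap]
    simp

theorem boundedB_unfold (k total mx : Int) (h1 : ¬ k = 1) (h2 : ¬ total = 0) :
    boundedB k total mx = (PySem.List.pyRange (min mx total) 0 (-1)).flatMap
      (fun head => (boundedB (k - 1) (total - head) head).map (fun rest => head :: rest)) := by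
  rw [boundedB.eq_def, if_neg h1, if_neg h2]
  exact attach_flatMap_eq _ (fun head => (boundedB (k - 1) (total - head) head).map (fun rest => head :: rest))

theorem countdown_split (t m : Int) (h0 : 0 ≤ m) (hmt : m ≤ t) :
    PySem.List.pyRange t 0 (-1) = PySem.List.pyRange t m (-1) ++ PySem.List.pyRange m 0 (-1) := by
  rw [PySem.List.pyRange_neg_one_eq_reverse, PySem.List.pyRange_neg_one_eq_reverse,
    PySem.List.pyRange_neg_one_eq_reverse, ← List.reverse_append]
  have := PySem.List.pyRange_one_append (0+1) (m+1) (t+1) (by omega) (by omega)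
  rw [this]

-- base cases of the bounded/filtered correspondence (no recursion involved)
theorem flatMap_cons_singleton (st : Int) (X : List (List Int)) :
    X.flatMap (fun q => [st :: q]) = X.map (fun q => st :: q) := by
  induction X <;> simp_all

theorem L1_base (k t s : Int) (hk : 1 ≤ k) (hs : 0 ≤ s) (hbase : k = 1 ∨ t ≤ 0) :
    (tuples_sum k t true).flatMap (selOk s) = boundedB k t s := by
  by_cases hk1 : k = 1
  · subst hk1
    rw [tuples_sum.eq_def, if_neg (by omega), if_pos rfl, boundedB.eq_def, if_pos rfl]
    simp only [List.flatMap_cons, List.flatMap_nil, List.append_nil, selOk]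
  · have hk2 : 2 ≤ k := by omega
    by_cases ht0 : t = 0
    · subst ht0
      rw [tuples_sum.eq_def, if_neg (by omega), if_neg hk1, if_pos rfl,
        boundedB.eq_def, if_neg hk1, if_pos rfl]
      obtain ⟨mm, hmm⟩ : ∃ mm, k.toNat = mm + 1 := ⟨k.toNat - 1, by omega⟩
      rw [hmm, List.replicate_succ]
      simp [selOk, hs]
    · have htneg : t < 0 := by rcases hbase with h | h <;> omega
      rw [tuples_sum_unfold _ _ _ (by omega) hk1 ht0, boundedB_unfold _ _ _ hk1 ht0,
        PySem.List.pyRange_neg_one_eq_nil (by omega),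
        PySem.List.pyRange_neg_one_eq_nil (by omega : min s t ≤ 0)]
      simp

theorem L1_aux (n : Nat) : ∀ (k t s : Int), t.toNat ≤ n → 1 ≤ k → 0 ≤ s →
    (tuples_sum k t true).flatMap (selOk s) = boundedB k t s := by
  induction n with
  | zero =>
    intro k t s htn hk hs
    by_cases hk1 : k = 1
    · exact L1_base k t s hk hs (Or.inl hk1)
    · exact L1_base k t s hk hs (Or.inr (by omega))
  | succ n ih =>
    intro k t s htn hk hs
    by_cases hbase : k = 1 ∨ t ≤ 0
    · exact L1_base k t s hk hs hbase
    · push_neg at hbase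
      obtain ⟨hk1, htpos⟩ := hbase
      have hk2 : 2 ≤ k := by omega
      rw [tuples_sum_unfold _ _ _ (by omega) hk1 (by omega)]
      have hblocks : ∀ st ∈ PySem.List.pyRange t 0 (-1),
          (tuples_sum (k - 1) (t - st) true).flatMap
            (fun qu => (selOk st qu).flatMap (gOrd true st))
          = (boundedB (k - 1) (t - st) st).map (fun q => st :: q) := by
        intro st hst
        have hb : 0 < st ∧ st ≤ t := by
          simpa using (PySem.List.mem_pyRange_neg_one.mp hst)
        have step1 : (tuples_sum (k - 1) (t - st) true).flatMap
            (fun qu => (selOk st qu).flatMap (gOrd true st))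
            = ((tuples_sum (k - 1) (t - st) true).flatMap (selOk st)).map (fun q => st :: q) := by
          rw [List.map_flatMap]
          apply List.flatMap_congr
          intro qu _
          rw [show gOrd true st = fun q => [st :: q] from funext fun q => by simp [gOrd]]
          exact flatMap_cons_singleton st _
        rw [step1, ih (k-1) (t-st) st (by omega) (by omega) (by omega)]
      rw [show (PySem.List.pyRange t 0 (-1)).flatMap (fun st =>
            (tuples_sum (k - 1) (t - st) true).flatMap
              (fun qu => (selOk st qu).flatMap (gOrd true st)))
          = (PySem.List.pyRange t 0 (-1)).flatMap (fun st =>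
              (boundedB (k - 1) (t - st) st).map (fun q => st :: q))
          from List.flatMap_congr hblocks]
      rw [List.flatMap_assoc]
      have hsel : ∀ st ∈ PySem.List.pyRange t 0 (-1),
          ((boundedB (k - 1) (t - st) st).map (fun q => st :: q)).flatMap (selOk s)
          = if st ≤ s then (boundedB (k - 1) (t - st) st).map (fun q => st :: q) else [] := by
        intro st _
        rw [List.flatMap_map]
        by_cases hle : st ≤ s
        · simp [selOk, hle, flatMap_cons_singleton]
        · simp [selOk, hle]
      rw [show (PySem.List.pyRange t 0 (-1)).flatMap (fun st =>
            ((boundedB (k - 1) (t - st) st).map (fun q => st :: q)).flatMap (selOk s))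
          = (PySem.List.pyRange t 0 (-1)).flatMap (fun st =>
              if st ≤ s then (boundedB (k - 1) (t - st) st).map (fun q => st :: q) else [])
          from List.flatMap_congr hsel]
      rw [countdown_split t (min s t) (by omega) (min_le_right _ _), List.flatMap_append]
      have hdead : (PySem.List.pyRange t (min s t) (-1)).flatMap
          (fun st => if st ≤ s then (boundedB (k - 1) (t - st) st).map (fun q => st :: q) else [])
          = [] := by
        trans ((PySem.List.pyRange t (min s t) (-1)).flatMap (fun _ => ([] : List (List Int))))
        · refine List.flatMap_congr ?_
          intro st hst
          have hb : min s t < st ∧ st ≤ t := by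
            simpa using (PySem.List.mem_pyRange_neg_one.mp hst)
          rw [if_neg]
          intro hle
          exact absurd (le_min hle hb.2) (by omega)
        · simp
      rw [hdead, List.nil_append]
      rw [boundedB_unfold _ _ _ hk1 (by omega)]
      apply List.flatMap_congr
      intro st hst
      have hb : 0 < st ∧ st ≤ min s t := by
        simpa using (PySem.List.mem_pyRange_neg_one.mp hst)
      rw [if_pos (by omega : st ≤ s)]

theorem L1_filtered_eq_bounded (k t s : Int) (hk : 1 ≤ k) (hs : 0 ≤ s) :
    (tuples_sum k t true).flatMap (selOk s) = boundedB k t s :=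
  L1_aux t.toNat k t s le_rfl hk hs

-- ===== VERDICT (by name: the statement is the Claim_ definition above) =====
theorem tuples_sum_spec : Claim_equal_tuples_sum := by
  unfold Claim_equal_tuples_sum
  intro nbval total order _ hpre
  unfold Spec_tuples_sum
  by_cases h0 : nbval = 0 ∧ total = 0
  · rw [tuples_sum.eq_def, tuples_sum_alt, if_pos h0, if_pos h0]
  · by_cases h1 : nbval = 1
    · rw [tuples_sum.eq_def, tuples_sum_alt, if_neg h0, if_neg h0, if_pos h1, if_pos h1]
    · by_cases h2 : total = 0
      · rw [tuples_sum.eq_def, tuples_sum_alt, if_neg h0, if_neg h0, if_pos h2, if_pos h2]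
      · by_cases hneg : total < 0
        · rw [tuples_sum_unfold _ _ _ h0 h1 h2, PySem.List.pyRange_neg_one_eq_nil (by omega)]
          rw [tuples_sum_alt, if_neg h0, if_neg h1, if_neg h2]
          by_cases hnb : nbval < 2
          · simp [hnb]
          · rw [if_neg hnb, boundedB_unfold _ _ _ h1 h2,
              PySem.List.pyRange_neg_one_eq_nil (by omega : min total total ≤ 0)]
            simp
        · have htpos : 0 < total := by omega
          have hnb2 : 2 ≤ nbval := by
            rcases hpre with h | h <;> omega
          rw [tuples_sum_unfold _ _ _ h0 h1 h2]
          rw [tuples_sum_alt, if_neg h0, if_neg h1, if_neg h2, if_neg (by omega : ¬ nbval < 2)]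
          rw [boundedB_unfold _ _ _ h1 h2, min_self, List.flatMap_assoc]
          apply List.flatMap_congr
          intro st hst
          have hb : 0 < st ∧ st ≤ total := by
            simpa using (PySem.List.mem_pyRange_neg_one.mp hst)
          rw [← List.flatMap_assoc,
            L1_filtered_eq_bounded (nbval - 1) (total - st) st (by omega) (by omega),
            List.flatMap_map]
          apply List.flatMap_congr
          intro q _
          simp only [Function.comp_def, gOrd]
          cases order with
          | true => rfl
          | false => simp [L2_permsDedup_eq_distinctPerms]
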